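-- pv_equiv track=rewrite | github.com/gmaffy/bioinformatics_tools | tree_maker/bin/create_individual_vcf.py | snpCallToGT
-- ===== SOURCE A (Python) =====
-- def snpCallToGT(REF,ALT, CALL):
--     GT = []
--     for base in CALL:
--         if not base in ["A", 'C', 'T', 'G']:
--             return './.'
--         elif base == REF:
--             GT.append('0')
--         else:
--             GT.append('1')
--     return '/'.join(GT)
-- ===== SOURCE B (Python) =====
-- def _gt(REF, s):
--     # genotype string for a chunk s of the call, or None if s has an invalid base
--     n = len(s)
--     if n == 0:
--         return ''
--     if n == 1:
--         if s not in ('A', 'C', 'T', 'G'):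
--             return None
--         return '0' if s == REF else '1'
--     left = _gt(REF, s[:n // 2])
--     right = _gt(REF, s[n // 2:])
--     if left is None or right is None:
--         return None
--     return left + '/' + right
--
--
-- def snpCallToGT(REF, ALT, CALL):
--     g = _gt(REF, CALL)
--     return './.' if g is None else g
-- ===== Notes on version B (the rewrite author's own statement) =====
-- stated objective: alternative
-- what changed: A's single left-to-right scan with an accumulator list and an early return is replaced by a divide-and-conquer recursion: the call is split in halves, each half is converted independently (None signalling an invalid base), and the results are concatenated with '/'; no accumulator, no join over a built list.
import Mathlib
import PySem

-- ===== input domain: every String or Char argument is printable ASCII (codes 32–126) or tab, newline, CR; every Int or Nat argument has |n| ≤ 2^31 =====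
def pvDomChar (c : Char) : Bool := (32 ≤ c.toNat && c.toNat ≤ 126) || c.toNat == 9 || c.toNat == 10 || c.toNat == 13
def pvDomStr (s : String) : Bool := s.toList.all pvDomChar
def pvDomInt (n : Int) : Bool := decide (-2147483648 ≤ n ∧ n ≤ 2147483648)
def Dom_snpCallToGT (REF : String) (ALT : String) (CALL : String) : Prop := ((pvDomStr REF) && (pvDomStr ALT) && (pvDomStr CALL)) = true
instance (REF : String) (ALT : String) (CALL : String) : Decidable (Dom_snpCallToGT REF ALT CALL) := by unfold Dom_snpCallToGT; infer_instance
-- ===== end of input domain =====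

-- B replaces A's single left-to-right accumulator scan by a divide-and-conquer recursion on
-- halves of CALL, combining the halves with '/' (objective: alternative algorithm, same cost class).

-- ===== PORT A =====
-- the loop of A: walk CALL, bail out on an invalid base, otherwise append '0'/'1' to GT
def snpA_loop (REF : String) (bs : List Char) (gt : List String) : String :=
  match bs with
  | [] => PySem.Str.join "/" gt
  | b :: rest =>
      if ¬ (String.ofList [b] ∈ ["A", "C", "T", "G"]) then "./."
      else if String.ofList [b] = REF then snpA_loop REF rest (gt ++ ["0"])
      else snpA_loop REF rest (gt ++ ["1"])

def snpCallToGT (REF : String) (ALT : String) (CALL : String) : String :=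
  snpA_loop REF CALL.toList []

-- ===== PORT B =====
-- _gt of Source B on the code points: none = invalid base somewhere in the chunk
def snpB_gt (REF : String) (s : List Char) : Option (List Char) :=
  match s with
  | [] => some []
  | [b] =>
      if String.ofList [b] ∈ ["A", "C", "T", "G"] then
        some (if String.ofList [b] = REF then ['0'] else ['1'])
      else none
  | b :: c :: rest =>
      let s' := b :: c :: rest
      match snpB_gt REF (s'.take (s'.length / 2)), snpB_gt REF (s'.drop (s'.length / 2)) with
      | some l, some r => some (l ++ ['/'] ++ r)
      | _, _ => none
termination_by s.length
decreasing_by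
  · simp [List.length_take]; omega
  · simp [List.length_drop]; omega

def snpCallToGT_alt (REF : String) (ALT : String) (CALL : String) : String :=
  match snpB_gt REF CALL.toList with
  | none => "./."
  | some g => String.ofList g

-- ===== PRECONDITION & SPEC =====
def Spec_snpCallToGT (REF : String) (ALT : String) (CALL : String) (out : String) : Prop := out = snpCallToGT_alt REF ALT CALL
instance (REF : String) (ALT : String) (CALL : String) (out : String) : Decidable (Spec_snpCallToGT REF ALT CALL out) := by unfold Spec_snpCallToGT; infer_instance

-- ===== CLAIM =====
def Claim_equal_snpCallToGT : Prop := ∀ (REF : String) (ALT : String) (CALL : String), Dom_snpCallToGT REF ALT CALL → Spec_snpCallToGT REF ALT CALL (snpCallToGT REF ALT CALL)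

-- ===== LEMMAS AND PROOFS =====

-- A's loop, characterised
theorem snpA_loop_eq (REF : String) (bs : List Char) (gt : List String) :
    snpA_loop REF bs gt =
      if ¬ (bs.all fun b => String.ofList [b] ∈ ["A", "C", "T", "G"]) then "./."
      else PySem.Str.join "/" (gt ++ bs.map fun b => if String.ofList [b] = REF then "0" else "1") := by
  induction bs generalizing gt with
  | nil => simp [snpA_loop]
  | cons b rest ih =>
    by_cases hv : String.ofList [b] ∈ ["A", "C", "T", "G"] <;>
      by_cases ha : (rest.all fun c => decide (String.ofList [c] ∈ ["A", "C", "T", "G"])) = true <;>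
        by_cases hr : String.ofList [b] = REF <;>
          simp only [snpA_loop, List.all_cons, hv, hr, ha, ih, List.append_assoc] <;>
            simp [ha, hr]

-- join distributes over a nonempty split
theorem chars_join_append (sep : List Char) (xs ys : List (List Char)) (hx : xs ≠ []) (hy : ys ≠ []) :
    PySem.Chars.join sep (xs ++ ys) = PySem.Chars.join sep xs ++ sep ++ PySem.Chars.join sep ys := by
  induction xs with
  | nil => simp at hx
  | cons a xs ih =>
    cases xs with
    | nil =>
      cases ys with
      | nil => simp at hy
      | cons b ys => simp [PySem.Chars.join_cons_cons, PySem.Chars.join_singleton, List.append_assoc]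
    | cons a' xs' =>
      have := ih (by simp)
      cases ys with
      | nil => simp at hy
      | cons b ys =>
        simp only [List.cons_append, PySem.Chars.join_cons_cons] at *
        simp [this, List.append_assoc]

-- B's recursion, characterised (strong induction on the chunk length)
theorem snpB_gt_eq_aux (REF : String) (n : Nat) : ∀ (s : List Char), s.length ≤ n →
    snpB_gt REF s =
      if (s.all fun b => String.ofList [b] ∈ ["A", "C", "T", "G"]) then
        some (PySem.Chars.join ['/']
          (s.map fun b => if String.ofList [b] = REF then ['0'] else ['1']))
      else none := by
  induction n with
  | zero =>
    intro s hs
    have : s = [] := List.eq_nil_of_length_eq_zero (Nat.le_zero.mp hs)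
    subst this; simp [snpB_gt]
  | succ n ih =>
    intro s hs
    match s with
    | [] => simp [snpB_gt]
    | [b] =>
      rw [snpB_gt]
      by_cases hv : String.ofList [b] ∈ ["A", "C", "T", "G"]
      · rw [if_pos hv]
        have : ([b].all fun b => decide (String.ofList [b] ∈ ["A", "C", "T", "G"])) = true := by
          simpa using hv
        rw [if_pos this]
        simp only [List.map_cons, List.map_nil, PySem.Chars.join_singleton]
      · rw [if_neg hv]
        have : ¬ ([b].all fun b => decide (String.ofList [b] ∈ ["A", "C", "T", "G"])) = true := by
          simpa using hv
        rw [if_neg this]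
    | b :: c :: rest =>
      rw [snpB_gt]
      set s' : List Char := b :: c :: rest with hs'
      have hlen : s'.length ≤ n + 1 := hs
      have hlen2 : s'.length = rest.length + 2 := by simp [hs']
      have hl1 : (s'.take (s'.length / 2)).length ≤ n := by
        rw [List.length_take]; omega
      have hl2 : (s'.drop (s'.length / 2)).length ≤ n := by
        rw [List.length_drop]; omega
      rw [ih _ hl1, ih _ hl2]
      have hall : (s'.all fun b => decide (String.ofList [b] ∈ ["A", "C", "T", "G"])) =
          (((s'.take (s'.length / 2)).all fun b => decide (String.ofList [b] ∈ ["A", "C", "T", "G"])) &&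
           ((s'.drop (s'.length / 2)).all fun b => decide (String.ofList [b] ∈ ["A", "C", "T", "G"]))) := by
        have hsplit := List.take_append_drop (s'.length / 2) s'
        calc (s'.all fun b => decide (String.ofList [b] ∈ ["A", "C", "T", "G"]))
            = ((s'.take (s'.length / 2) ++ s'.drop (s'.length / 2)).all
                fun b => decide (String.ofList [b] ∈ ["A", "C", "T", "G"])) := by rw [hsplit]
          _ = _ := List.all_append
      rw [hall]
      by_cases h1 : ((s'.take (s'.length / 2)).all fun b => decide (String.ofList [b] ∈ ["A", "C", "T", "G"])) = true
      · by_cases h2 : ((s'.drop (s'.length / 2)).all fun b => decide (String.ofList [b] ∈ ["A", "C", "T", "G"])) = true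
        · simp only [h1, h2, Bool.true_and, if_true]
          have hx : (s'.take (s'.length / 2)).map (fun b => if String.ofList [b] = REF then ['0'] else ['1']) ≠ [] := by
            simp only [ne_eq, List.map_eq_nil_iff, List.take_eq_nil_iff, hs']
            simp
          have hy : (s'.drop (s'.length / 2)).map (fun b => if String.ofList [b] = REF then ['0'] else ['1']) ≠ [] := by
            simp only [ne_eq, List.map_eq_nil_iff, List.drop_eq_nil_iff, hs']
            simp
            omega
          rw [← chars_join_append ['/'] _ _ hx hy, ← List.map_append, List.take_append_drop]
        · rw [if_pos h1, if_neg h2, eq_false_of_ne_true h2, Bool.and_false]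
          rfl
      · by_cases h2 : ((s'.drop (s'.length / 2)).all fun b => decide (String.ofList [b] ∈ ["A", "C", "T", "G"])) = true
        · rw [if_neg h1, if_pos h2, eq_false_of_ne_true h1, Bool.false_and]
          rfl
        · rw [if_neg h1, if_neg h2, eq_false_of_ne_true h1, Bool.false_and]
          rfl

theorem snpB_gt_eq (REF : String) (s : List Char) :
    snpB_gt REF s =
      if (s.all fun b => String.ofList [b] ∈ ["A", "C", "T", "G"]) then
        some (PySem.Chars.join ['/']
          (s.map fun b => if String.ofList [b] = REF then ['0'] else ['1']))
      else none :=
  snpB_gt_eq_aux REF s.length s le_rfl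

theorem snpCallToGT_spec : Claim_equal_snpCallToGT := by
  intro REF ALT CALL _
  unfold Spec_snpCallToGT snpCallToGT snpCallToGT_alt
  rw [snpA_loop_eq, snpB_gt_eq]
  by_cases h : (CALL.toList.all fun b => decide (String.ofList [b] ∈ ["A", "C", "T", "G"])) = true
  · rw [if_pos h, if_neg (not_not_intro h)]
    simp only [List.nil_append]
    apply String.toList_inj.mp
    simp only [PySem.Str.toList_join, List.map_map, String.toList_ofList]
    have : (String.toList ∘ fun b => if String.ofList [b] = REF then "0" else "1") =
        (fun b => if String.ofList [b] = REF then ['0'] else ['1']) := by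
      funext b; by_cases hr : String.ofList [b] = REF <;> simp [hr]
    rw [this]
    rfl
  · rw [if_neg h, if_pos (by simpa using h)]
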